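-- pv_equiv track=rewrite | github.com/Ankita5051/DSA | OA/oracle/bit manipulation.py | minopn
-- ===== SOURCE A (Python) =====
-- def minopn(n):
--     if n==0:
--         return 0
--     k=n.bit_length()-1
--     p=1<<k
--     if n==p:
--         return (1<<(k+1))-1
--     return 1+((1<<(k+1))-1)-minopn(n-p)
-- ===== SOURCE B (Python) =====
-- def minopn(n):
--     if n == 0:
--         return 0
--     total = 0
--     sign = 1
--     for pos in range(n.bit_length() - 1, -1, -1):
--         if (n >> pos) & 1:
--             total += sign * (1 << (pos + 1))
--             sign = -sign
--     return total + sign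
-- ===== Notes on version B (the rewrite author's own statement) =====
-- stated objective: alternative
-- what changed: Replaced A's recursion (peel the top set bit, recurse on the remainder) by a single non-recursive loop over bit positions that accumulates sign*(1<<(pos+1)) per set bit with an alternating sign, plus a final sign correction.
import Mathlib
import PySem

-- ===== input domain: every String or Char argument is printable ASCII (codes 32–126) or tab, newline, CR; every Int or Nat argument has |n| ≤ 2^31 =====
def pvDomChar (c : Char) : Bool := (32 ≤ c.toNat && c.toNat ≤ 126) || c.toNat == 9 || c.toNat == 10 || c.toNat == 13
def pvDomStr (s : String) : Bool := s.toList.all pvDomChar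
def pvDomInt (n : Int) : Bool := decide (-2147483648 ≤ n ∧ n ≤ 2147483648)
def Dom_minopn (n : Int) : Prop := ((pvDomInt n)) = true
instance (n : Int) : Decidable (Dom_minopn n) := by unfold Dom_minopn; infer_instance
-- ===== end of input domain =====

-- B replaces A's recursion by one loop over bit positions with an alternating sign (same value, no recursion).

-- ===== PORT A =====
-- A's recursion descends from n to n - 2^(bit_length n - 1); the fuel argument only
-- makes the recursion total in Lean (for 0 ≤ n the fuel n.toNat + 1 never runs out,
-- matching Python exactly; for n < 0 Python never returns — excluded by Pre_).
def minopnA : Nat → Int → Int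
  | 0, _ => 0
  | fuel + 1, n =>
    if n = 0 then 0
    else
      let k : Nat := n.natAbs.size - 1      -- Python n.bit_length() - 1 (bit_length = Nat.size of |n|)
      let p : Int := 2 ^ k
      if n = p then 2 ^ (k + 1) - 1
      else 1 + (2 ^ (k + 1) - 1) - minopnA fuel (n - p)

def minopn (n : Int) : Int := minopnA (n.toNat + 1) n

-- ===== PORT B =====
-- one loop step: if bit `pos` of n is set, add sign * 2^(pos+1) and flip the sign
def minopnStep (n : Int) (st : Int × Int) (pos : Nat) : Int × Int :=
  if Int.land (n >>> pos) 1 = 1 then (st.1 + st.2 * 2 ^ (pos + 1), -st.2) else st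

def minopn_alt (n : Int) : Int :=
  if n = 0 then 0
  else
    let st := ((List.range n.natAbs.size).reverse).foldl (minopnStep n) (0, 1)
    st.1 + st.2

-- ===== PRECONDITION & SPEC =====
-- Pre_ excludes n < 0, on which Python A recurses forever (RecursionError); A returns on all n ≥ 0.
def Pre_minopn (n : Int) : Prop := 0 ≤ n
instance (n : Int) : Decidable (Pre_minopn n) := by unfold Pre_minopn; infer_instance
def pvWitness_minopn : Int := (6)
def Spec_minopn (n : Int) (out : Int) : Prop := out = minopn_alt n
instance (n : Int) (out : Int) : Decidable (Spec_minopn n out) := by unfold Spec_minopn; infer_instance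

-- ===== CLAIM (what is proved, stated in full; the proofs are below) =====
def Claim_equal_minopn : Prop := ∀ (n : Int), Dom_minopn n → Pre_minopn n → Spec_minopn n (minopn n)

-- ===== LEMMAS AND PROOFS =====

-- closed description of B's fold state: Fv is the accumulated total, Ev the final sign
def Fv (m : Nat) : List Nat → Int
  | [] => 0
  | p :: ps => if m.testBit p then 2 ^ (p + 1) - Fv m ps else Fv m ps

def Ev (m : Nat) : List Nat → Int
  | [] => 1
  | p :: ps => if m.testBit p then -Ev m ps else Ev m ps

-- reference recursion (A's algorithm on Nat, well-founded)
def R (m : Nat) : Int :=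
  if h : m = 0 then 0
  else
    let k := m.size - 1
    if m = 2 ^ k then 2 ^ (k + 1) - 1
    else 2 ^ (k + 1) - R (m - 2 ^ k)
termination_by m
decreasing_by
  have : 0 < 2 ^ (m.size - 1) := Nat.two_pow_pos _
  omega

theorem bittest (m p : Nat) : Int.land ((m : Int) >>> p) 1 = if m.testBit p then 1 else 0 := by
  have h2 : Int.land ((m : Int) >>> p) ((1 : Nat) : Int) = (((m >>> p).land 1 : Nat) : Int) :=
    Int.mem_toNat?.mp rfl
  norm_num at h2
  rw [h2]
  have h3 : (m >>> p).land 1 = (m >>> p) % 2 := Nat.and_one_is_mod _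
  rw [h3]
  rcases Bool.eq_false_or_eq_true (m.testBit p) with h | h <;>
      rw [h] <;> simp [Nat.testBit] at h <;> simp [h]

theorem fold_char (m : Nat) (ps : List Nat) : ∀ t s : Int,
    ps.foldl (minopnStep (m : Int)) (t, s) = (t + s * Fv m ps, s * Ev m ps) := by
  induction ps with
  | nil => intro t s; simp [Fv, Ev]
  | cons p ps ih =>
    intro t s
    simp only [List.foldl, minopnStep, bittest, Fv, Ev]
    by_cases h : m.testBit p <;> simp [h, ih, Prod.ext_iff]; ring

theorem pad (m j : Nat) (h : m.size ≤ j) :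
    Fv m (List.range j).reverse = Fv m (List.range m.size).reverse ∧
    Ev m (List.range j).reverse = Ev m (List.range m.size).reverse := by
  induction j with
  | zero =>
    have : m.size = 0 := Nat.le_zero.mp h
    rw [this]; exact ⟨rfl, rfl⟩
  | succ j ih =>
    by_cases hj : m.size = j + 1
    · rw [hj]; exact ⟨rfl, rfl⟩
    · have hle : m.size ≤ j := by omega
      have hbit : m.testBit j = false :=
        Nat.testBit_lt_two_pow (Nat.size_le.mp hle)
      have hrange : (List.range (j + 1)).reverse = j :: (List.range j).reverse := by
        rw [List.range_succ, List.reverse_append]; rfl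
      rw [hrange]
      simp only [Fv, Ev, hbit, Bool.false_eq_true, if_false]
      exact ih hle

theorem Fv_congr (m m' : Nat) (l : List Nat) (h : ∀ p ∈ l, m.testBit p = m'.testBit p) :
    Fv m l = Fv m' l ∧ Ev m l = Ev m' l := by
  induction l with
  | nil => exact ⟨rfl, rfl⟩
  | cons p ps ih =>
    have hp := h p (List.mem_cons_self ..)
    have ihs := ih (fun q hq => h q (List.mem_cons_of_mem _ hq))
    simp only [Fv, Ev]
    rw [hp, ihs.1, ihs.2]
    exact ⟨rfl, rfl⟩

theorem R_pos (m : Nat) (h0 : m ≠ 0) :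
    R m = if m = 2 ^ (m.size - 1) then 2 ^ (m.size - 1 + 1) - 1
          else 2 ^ (m.size - 1 + 1) - R (m - 2 ^ (m.size - 1)) := by
  rw [R]; simp [h0]

theorem minopnA_eq_R : ∀ fuel m, m < fuel → minopnA fuel ((m : Nat) : Int) = R m := by
  intro fuel
  induction fuel with
  | zero => intro m h; omega
  | succ fuel ih =>
    intro m h
    rw [minopnA]
    by_cases h0 : m = 0
    · simp [h0, R]
    · have h0' : ((m : Nat) : Int) ≠ 0 := by exact_mod_cast h0
      have habs : ((m : Nat) : Int).natAbs = m := Int.natAbs_natCast m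
      rw [R_pos m h0]
      simp only [h0', if_false, habs]
      set k := m.size - 1 with hk
      have hpow : ((2 : Int) ^ k) = (((2 ^ k : Nat)) : Int) := by push_cast; ring
      have hkm : 2 ^ k ≤ m := by
        have : k < m.size := by
          have := Nat.size_pos.mpr (Nat.pos_of_ne_zero h0)
          omega
        exact Nat.lt_size.mp this
      by_cases hp : m = 2 ^ k
      · have : ((m : Nat) : Int) = 2 ^ k := by rw [hpow]; exact_mod_cast hp
        rw [if_pos hp, this, if_pos rfl]
      · have hne : ((m : Nat) : Int) ≠ 2 ^ k := by
          rw [hpow]; exact_mod_cast hp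
        rw [if_neg hne, if_neg hp]
        have hsub : ((m : Nat) : Int) - 2 ^ k = (((m - 2 ^ k : Nat)) : Int) := by
          rw [hpow]; push_cast [hkm]; ring
        rw [hsub, ih (m - 2 ^ k) (by
          have : 0 < 2 ^ k := Nat.two_pow_pos _
          omega)]
        ring

theorem alt_eq_R (m : Nat) : minopn_alt ((m : Nat) : Int) = R m := by
  induction m using Nat.strong_induction_on with
  | _ m ih =>
    by_cases h0 : m = 0
    · simp [minopn_alt, R, h0]
    · have h0' : ((m : Nat) : Int) ≠ 0 := by exact_mod_cast h0
      have hszpos : 0 < m.size := Nat.size_pos.mpr (Nat.pos_of_ne_zero h0)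
      set k := m.size - 1 with hk
      have hsz : m.size = k + 1 := by omega
      have hkm : 2 ^ k ≤ m := Nat.lt_size.mp (by omega)
      have hmlt : m < 2 ^ (k + 1) := Nat.size_le.mp (by omega)
      set m' := m - 2 ^ k with hm'
      have hmeq : m = 2 ^ k + m' := by omega
      have hm'lt : m' < 2 ^ k := by omega
      have hbitk : m.testBit k = true := by
        rw [hmeq, Nat.testBit_two_pow_add_eq, Nat.testBit_lt_two_pow hm'lt]; rfl
      have hbits : ∀ p ∈ (List.range k).reverse, m.testBit p = m'.testBit p := by
        intro p hp
        have : p < k := by simpa using hp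
        rw [hmeq]; exact Nat.testBit_two_pow_add_gt this m'
      have hrange : (List.range (k + 1)).reverse = k :: (List.range k).reverse := by
        rw [List.range_succ, List.reverse_append]; rfl
      have halt : minopn_alt ((m : Nat) : Int)
          = (2 ^ (k + 1) - Fv m' (List.range k).reverse) + -Ev m' (List.range k).reverse := by
        rw [minopn_alt]
        simp only [h0', if_false, Int.natAbs_natCast, hsz, hrange,
          fold_char m (k :: (List.range k).reverse) 0 1]
        have hc := Fv_congr m m' (List.range k).reverse hbits
        simp only [Fv, Ev, hbitk, if_true, hc.1, hc.2]
        ring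
      by_cases hz : m' = 0
      · have hp : m = 2 ^ k := by omega
        have hFv0 : ∀ l : List Nat, Fv 0 l = 0 ∧ Ev 0 l = 1 := by
          intro l
          induction l with
          | nil => exact ⟨rfl, rfl⟩
          | cons q qs ihq => simp [Fv, Ev, Nat.zero_testBit, ihq.1, ihq.2]
        have hRm : R m = 2 ^ (k + 1) - 1 := by
          rw [R_pos m h0, ← hk, if_pos hp]
        rw [halt, hz, (hFv0 _).1, (hFv0 _).2, hRm]
        ring
      · have hm'pos : 0 < m' := Nat.pos_of_ne_zero hz
        have hm'sz : m'.size ≤ k := Nat.size_le.mpr hm'lt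
        have hpadm' := pad m' k hm'sz
        have ihm' := ih m' (by omega)
        have haltm' : minopn_alt ((m' : Nat) : Int)
            = Fv m' (List.range m'.size).reverse + Ev m' (List.range m'.size).reverse := by
          have hz' : ((m' : Nat) : Int) ≠ 0 := by exact_mod_cast hz
          rw [minopn_alt]
          simp only [hz', if_false, Int.natAbs_natCast,
            fold_char m' (List.range m'.size).reverse 0 1]
          ring
        have hRm : R m = 2 ^ (k + 1) - R m' := by
          have hp : m ≠ 2 ^ k := by omega
          rw [R_pos m h0, ← hk, if_neg hp]
        rw [halt, hRm, hpadm'.1, hpadm'.2, ← ihm', haltm']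
        ring

-- ===== VERDICT (by name: the statement is the Claim_ definition above) =====
theorem minopn_spec : Claim_equal_minopn := by
  unfold Claim_equal_minopn Spec_minopn Pre_minopn
  intro n _ hpre
  obtain ⟨m, rfl⟩ := Int.eq_ofNat_of_zero_le hpre
  have : ((m : Nat) : Int).toNat = m := Int.toNat_natCast m
  rw [minopn, this, minopnA_eq_R (m + 1) m (Nat.lt_succ_self m), alt_eq_R]
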